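-- pv_equiv track=rewrite | github.com/ISISComputingGroup/EPICS-DeviceEmulator | lewis_emulators/utils/byte_conversions.py | raw_bytes_to_int
-- ===== SOURCE A (Python) =====
-- BYTE = 2**8
--
-- def raw_bytes_to_int(raw_bytes, low_bytes_first=True):
--     """
--     Converts an unsigned set of bytes to an integer.
--
--     Args:
--         raw_bytes (string): A string representation of the raw bytes.
--         low_bytes_first (bool): Whether the given raw bytes are in little endian or not. True by default.
--
--     Returns:
--         int: The integer represented by the raw bytes passed in.
--     """
--     if not low_bytes_first:
--         raw_bytes = raw_bytes[::-1]
--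
--     multiplier = 1
--     result = 0
--     for b in raw_bytes:
--         result += ord(b) * multiplier
--         multiplier *= BYTE
--     return result
-- ===== SOURCE B (Python) =====
-- BYTE = 2**8
--
-- def raw_bytes_to_int(raw_bytes, low_bytes_first=True):
--     """Horner's method: fold a single accumulator most-significant-byte first."""
--     result = 0
--     for b in (reversed(raw_bytes) if low_bytes_first else raw_bytes):
--         result = result * BYTE + ord(b)
--     return result
-- ===== Notes on version B (the rewrite author's own statement) =====
-- stated objective: simpler
-- what changed: Replaces the two-variable loop (running multiplier plus sum) over an up-front-reversed string with a single-accumulator Horner fold result = result*256 + ord(b), iterating most-significant-byte first so endianness becomes a choice of iteration direction.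
import Mathlib
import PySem

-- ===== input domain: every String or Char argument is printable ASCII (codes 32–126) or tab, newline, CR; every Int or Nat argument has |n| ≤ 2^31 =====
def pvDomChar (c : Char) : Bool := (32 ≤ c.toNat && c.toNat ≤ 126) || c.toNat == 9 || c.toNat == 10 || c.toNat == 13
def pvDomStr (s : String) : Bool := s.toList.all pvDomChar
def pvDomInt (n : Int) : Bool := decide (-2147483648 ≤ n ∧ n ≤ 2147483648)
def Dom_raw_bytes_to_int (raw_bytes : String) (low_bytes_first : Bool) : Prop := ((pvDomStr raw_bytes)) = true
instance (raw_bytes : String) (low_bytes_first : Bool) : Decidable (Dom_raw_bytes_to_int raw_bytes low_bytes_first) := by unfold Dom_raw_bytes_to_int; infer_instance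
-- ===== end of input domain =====

-- B replaces A's multiplier+sum loop over a pre-reversed string with a single-accumulator
-- Horner fold (result = result*256 + ord(b)) iterated most-significant-byte first (simpler).

-- ===== PORT A =====
-- A: optionally reverse (raw_bytes[::-1] reverses the string), then loop with (result, multiplier).
def raw_bytes_to_int (raw_bytes : String) (low_bytes_first : Bool) : Int :=
  let bytes := if ¬ low_bytes_first then raw_bytes.toList.reverse else raw_bytes.toList
  (bytes.foldl (fun (st : Int × Int) b => (st.1 + (b.toNat : Int) * st.2, st.2 * 256)) (0, 1)).1

-- ===== PORT B =====
-- B: Horner fold, most-significant-first: reversed(raw_bytes) when little-endian, forward otherwise.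
def raw_bytes_to_int_alt (raw_bytes : String) (low_bytes_first : Bool) : Int :=
  (if low_bytes_first then raw_bytes.toList.reverse else raw_bytes.toList).foldl
    (fun (result : Int) b => result * 256 + (b.toNat : Int)) 0

-- ===== PRECONDITION & SPEC =====
def Spec_raw_bytes_to_int (raw_bytes : String) (low_bytes_first : Bool) (out : Int) : Prop := out = raw_bytes_to_int_alt raw_bytes low_bytes_first
instance (raw_bytes : String) (low_bytes_first : Bool) (out : Int) : Decidable (Spec_raw_bytes_to_int raw_bytes low_bytes_first out) := by unfold Spec_raw_bytes_to_int; infer_instance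

-- ===== CLAIM (what is proved, stated in full; the proofs are below) =====
def Claim_equal_raw_bytes_to_int : Prop := ∀ (raw_bytes : String) (low_bytes_first : Bool), Dom_raw_bytes_to_int raw_bytes low_bytes_first → Spec_raw_bytes_to_int raw_bytes low_bytes_first (raw_bytes_to_int raw_bytes low_bytes_first)

-- ===== LEMMAS AND PROOFS =====
-- A's fold starting at (r, m) yields r + Horner(l.reverse) * m.
theorem pv_fold_eq_horner (l : List Char) : ∀ (r m : Int),
    (l.foldl (fun (st : Int × Int) b => (st.1 + (b.toNat : Int) * st.2, st.2 * 256)) (r, m)).1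
      = r + (l.reverse.foldl (fun (result : Int) b => result * 256 + (b.toNat : Int)) 0) * m := by
  induction l with
  | nil => intro r m; simp
  | cons b l ih =>
      intro r m
      simp only [List.foldl_cons, List.reverse_cons, List.foldl_append, List.foldl_nil, ih]
      ring

-- ===== VERDICT (by name: the statement is the Claim_ definition above) =====
theorem raw_bytes_to_int_spec : Claim_equal_raw_bytes_to_int := by
  intro s lo _
  unfold Spec_raw_bytes_to_int raw_bytes_to_int raw_bytes_to_int_alt
  cases lo
  · rw [if_pos (by decide : ¬(false = true)), if_neg (by decide : ¬(false = true)),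
      pv_fold_eq_horner, List.reverse_reverse]
    ring
  · rw [if_neg (by decide : ¬(¬(true = true))), if_pos (by decide : (true = true)),
      pv_fold_eq_horner]
    ring
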